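-- pv_equiv track=rewrite | github.com/drinconcam364/ECE652 | composable_drain_phase1_research.py | build_schedule_burst
-- ===== SOURCE A (Python) =====
-- from typing import Dict, List, Optional, Tuple
-- from collections import defaultdict, deque
--
-- def build_schedule_burst(start_cycle: int, flows: List[Tuple[str, str]], count_per_flow: int, spread: int = 0):
--     schedule = defaultdict(list)
--
--     if spread <= 0:
--         for _ in range(count_per_flow):
--             for src, dst in flows:
--                 schedule[start_cycle].append((src, dst))
--     else:
--         current_cycle = start_cycle
--         for _ in range(count_per_flow):
--             for src, dst in flows:
--                 schedule[current_cycle].append((src, dst))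
--                 current_cycle += spread
--
--     return schedule
-- ===== SOURCE B (Python) =====
-- from collections import defaultdict
--
--
-- def build_schedule_burst(start_cycle, flows, count_per_flow, spread=0):
--     # Construct the final mapping directly in closed form: each key's complete
--     # value list is computed by modular indexing into flows, so there is no
--     # nested repeat loop, no append, and no running cycle accumulator.
--     schedule = defaultdict(list)
--     total = len(flows) * count_per_flow
--     if spread <= 0:
--         if total > 0:
--             schedule[start_cycle] = [flows[i % len(flows)] for i in range(total)]
--     else:
--         schedule.update(
--             (start_cycle + i * spread, [flows[i % len(flows)]])
--             for i in range(total)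
--         )
--     return schedule
-- ===== Notes on version B (the rewrite author's own statement) =====
-- stated objective: alternative
-- what changed: Replaces A's nested repeat-count/flows loops with per-key appends and a running cycle accumulator by a direct closed-form construction of the final dict: each key's complete value list is computed by modular indexing flows[i % len(flows)], assigned wholesale for spread<=0 and inserted via a single dict.update of (cycle, [flow]) pairs for spread>0.
import Mathlib
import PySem

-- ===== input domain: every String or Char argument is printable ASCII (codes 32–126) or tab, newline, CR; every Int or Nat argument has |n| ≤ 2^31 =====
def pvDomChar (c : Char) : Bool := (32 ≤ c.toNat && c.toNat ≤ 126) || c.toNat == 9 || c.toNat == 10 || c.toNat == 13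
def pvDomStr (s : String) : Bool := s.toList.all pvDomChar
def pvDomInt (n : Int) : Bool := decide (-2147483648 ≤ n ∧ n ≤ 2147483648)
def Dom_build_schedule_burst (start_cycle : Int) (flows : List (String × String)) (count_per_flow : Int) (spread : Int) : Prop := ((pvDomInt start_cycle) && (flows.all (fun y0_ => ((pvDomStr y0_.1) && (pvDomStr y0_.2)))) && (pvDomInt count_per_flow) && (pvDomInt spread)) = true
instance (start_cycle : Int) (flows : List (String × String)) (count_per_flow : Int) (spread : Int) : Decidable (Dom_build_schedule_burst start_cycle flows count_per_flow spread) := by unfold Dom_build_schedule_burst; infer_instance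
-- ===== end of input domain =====

-- B builds the final dict directly in closed form — each key's complete value is computed by modular indexing into flows (dict.update of (key, [flow]) pairs for spread>0, one wholesale assignment for spread<=0) — replacing A's nested repeat loops, appends and running cycle accumulator; objective: alternative decomposition, same cost.


-- ===== PORT A =====
def build_schedule_burst (start_cycle : Int) (flows : List (String × String)) (count_per_flow : Int) (spread : Int) : List (Int × List (String × String)) :=
  if spread ≤ 0 then
    ((PySem.List.pyRange 0 count_per_flow 1).foldl
      (fun d _ => flows.foldl (fun d f => d.modify start_cycle [] (· ++ [f])) d)
      (PySem.Dict.empty : PySem.Dict Int (List (String × String)))).items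
  else
    (((PySem.List.pyRange 0 count_per_flow 1).foldl
      (fun st _ => flows.foldl
        (fun (st : PySem.Dict Int (List (String × String)) × Int) f =>
          (st.1.modify st.2 [] (· ++ [f]), st.2 + spread)) st)
      (PySem.Dict.empty, start_cycle)).1).items

-- ===== PORT B =====
-- flows[i % len(flows)] is ported with pyGetD: the index is always in range
-- (0 ≤ i % len < len, and the ranges are empty whenever flows is empty), so the
-- default ("","") is never returned and the port is exact.
def build_schedule_burst_alt (start_cycle : Int) (flows : List (String × String)) (count_per_flow : Int) (spread : Int) : List (Int × List (String × String)) :=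
  (if spread ≤ 0 then
    if 0 < (flows.length : Int) * count_per_flow then
      PySem.Dict.empty.insert start_cycle
        ((PySem.List.pyRange 0 ((flows.length : Int) * count_per_flow) 1).map
          (fun i => PySem.List.pyGetD flows (PySem.Int.mod i (flows.length : Int)) ("", "")))
    else PySem.Dict.empty
  else
    -- dict.update over a generator of (key, value) pairs = successive inserts
    (PySem.List.pyRange 0 ((flows.length : Int) * count_per_flow) 1).foldl
      (fun d i => d.insert (start_cycle + i * spread)
        [PySem.List.pyGetD flows (PySem.Int.mod i (flows.length : Int)) ("", "")])
      (PySem.Dict.empty : PySem.Dict Int (List (String × String)))).items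

-- ===== PRECONDITION & SPEC =====
def Spec_build_schedule_burst (start_cycle : Int) (flows : List (String × String)) (count_per_flow : Int) (spread : Int) (out : List (Int × List (String × String))) : Prop := out = build_schedule_burst_alt start_cycle flows count_per_flow spread
instance (start_cycle : Int) (flows : List (String × String)) (count_per_flow : Int) (spread : Int) (out : List (Int × List (String × String))) : Decidable (Spec_build_schedule_burst start_cycle flows count_per_flow spread out) := by unfold Spec_build_schedule_burst; infer_instance

-- ===== CLAIM (what is proved, stated in full; the proofs are below) =====
def Claim_equal_build_schedule_burst : Prop := ∀ (start_cycle : Int) (flows : List (String × String)) (count_per_flow : Int) (spread : Int), Dom_build_schedule_burst start_cycle flows count_per_flow spread → Spec_build_schedule_burst start_cycle flows count_per_flow spread (build_schedule_burst start_cycle flows count_per_flow spread)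

-- ===== LEMMAS AND PROOFS =====

-- nested "for _ in range(n): for f in flows" fold = fold over the flattened repetition
theorem pvFoldlRepeat {σ : Type} (flows : List (String × String)) (step : σ → (String × String) → σ) :
    ∀ (rs : List Int) (st : σ),
      rs.foldl (fun st _ => flows.foldl step st) st
        = ((List.replicate rs.length flows).flatten).foldl step st := by
  intro rs
  induction rs with
  | nil => intro st; rfl
  | cons r rs ih =>
    intro st
    simp [List.replicate_succ, List.foldl_append, ih]

theorem pvPyRangeLen (n : Int) : (PySem.List.pyRange 0 n 1).length = n.toNat := by
  by_cases hn : 0 < n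
  · simp [PySem.List.pyRange, hn]
  · simp [PySem.List.pyRange, hn]
    omega

-- repeated append at one fixed key
theorem pvFoldConst (c : Int) :
    ∀ (l : List (String × String)) (d : PySem.Dict Int (List (String × String))),
      l.foldl (fun d f => d.modify c [] (· ++ [f])) d
        = if l = [] then d else d.insert c (d.getD c [] ++ l) := by
  intro l
  induction l with
  | nil => intro d; rfl
  | cons a l ih =>
    intro d
    rw [List.foldl_cons, ih]
    cases l with
    | nil => simp [PySem.Dict.modify]
    | cons b t =>
      simp [PySem.Dict.modify, PySem.Dict.getD_insert_self, PySem.Dict.insert_insert_self]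

theorem pvNotContains (d : PySem.Dict Int (List (String × String))) (c : Int)
    (h : ∀ k ∈ d.keys, k < c) : d.contains c = false := by
  by_contra hc
  have : d.contains c = true := by
    cases hcontains : d.contains c
    · exact absurd hcontains hc
    · rfl
  exact absurd (h c ((PySem.Dict.contains_iff_mem_keys d c).mp this)) (lt_irrefl c)

-- A's spread>0 loop, flattened, with the running cycle made explicit
theorem pvPlaceA (start_cycle spread : Int) (hs : 0 < spread) :
    ∀ (l : List (String × String)) (j : Int) (d : PySem.Dict Int (List (String × String))),
      (∀ k ∈ d.keys, k < start_cycle + j * spread) →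
      l.foldl (fun (st : PySem.Dict Int (List (String × String)) × Int) f =>
          (st.1.modify st.2 [] (· ++ [f]), st.2 + spread)) (d, start_cycle + j * spread)
        = (PySem.Dict.mk (d.items ++ (PySem.List.enumerate l j).map
            (fun p => (start_cycle + p.1 * spread, [p.2]))),
           start_cycle + (j + l.length) * spread) := by
  intro l
  induction l with
  | nil =>
    intro j d _
    simp only [List.foldl_nil, PySem.List.enumerate, List.map_nil, List.append_nil,
      List.length_nil, Prod.mk.injEq]
    exact ⟨by trivial, by ring⟩
  | cons f l ih =>
    intro j d hk
    have hnc : d.contains (start_cycle + j * spread) = false :=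
      pvNotContains d _ (by intro k hm; exact hk k hm)
    have hstep : (d.modify (start_cycle + j * spread) [] (· ++ [f]))
        = d.insert (start_cycle + j * spread) [f] := by
      simp [PySem.Dict.modify, PySem.Dict.getD_of_not_contains d _ hnc]
    simp only [List.foldl_cons, hstep]
    have harg : start_cycle + j * spread + spread = start_cycle + (j + 1) * spread := by ring
    rw [harg]
    have hk' : ∀ k ∈ (d.insert (start_cycle + j * spread) [f]).keys,
        k < start_cycle + (j + 1) * spread := by
      intro k hm
      rw [PySem.Dict.keys_insert_of_not_contains d _ hnc] at hm
      rcases List.mem_append.mp hm with h | h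
      · have := hk k h; nlinarith
      · simp at h; subst h; nlinarith
    rw [ih (j + 1) _ hk', Prod.mk.injEq]
    refine ⟨?_, ?_⟩
    · apply PySem.Dict.ext
      simp [PySem.Dict.items_insert_of_not_contains d _ hnc, PySem.List.enumerate]
    · simp only [List.length_cons]
      push_cast
      ring

-- flattened repetition indexed with getD = modular indexing into flows
theorem pvFlatGet (flows : List (String × String)) :
    ∀ (n k : Nat), k < flows.length * n →
      ((List.replicate n flows).flatten).getD k ("", "")
        = flows.getD (k % flows.length) ("", "") := by
  intro n
  induction n with
  | zero => intro k hk; omega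
  | succ n ih =>
    intro k hk
    rw [Nat.mul_succ] at hk
    have hm : 0 < flows.length := by by_contra h; simp at h; simp [h] at hk
    rw [List.replicate_succ, List.flatten_cons]
    by_cases hklt : k < flows.length
    · rw [List.getD_append _ _ _ _ hklt, Nat.mod_eq_of_lt hklt]
    · have hge : flows.length ≤ k := by omega
      rw [List.getD_append_right _ _ _ _ hge, ih (k - flows.length) (by omega)]
      rw [Nat.mod_eq_sub_mod hge]

theorem pvMapGetD {α : Type} (xs : List α) (d : α) :
    (List.range xs.length).map (fun k => xs.getD k d) = xs := by
  apply List.ext_getElem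
  · simp
  · intro i h1 h2
    simp [List.getD_eq_getElem?_getD, List.getElem?_eq_getElem h2]

-- the modular-index comprehension recovers the flattened repetition
theorem pvMapMod (flows : List (String × String)) (n : Nat) :
    (List.range (flows.length * n)).map
        (fun k => flows.getD (k % flows.length) ("", ""))
      = (List.replicate n flows).flatten := by
  have hlen : ((List.replicate n flows).flatten).length = flows.length * n := by
    simp [List.length_flatten, List.map_replicate, Nat.mul_comm]
  calc (List.range (flows.length * n)).map
          (fun k => flows.getD (k % flows.length) ("", ""))
      = (List.range (flows.length * n)).map
          (fun k => ((List.replicate n flows).flatten).getD k ("", "")) := by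
        apply List.map_congr_left
        intro k hk
        exact (pvFlatGet flows n k (List.mem_range.mp hk)).symm
    _ = (List.replicate n flows).flatten := by
        rw [← hlen]
        exact pvMapGetD _ _

-- B's successive fresh-key inserts build exactly the mapped items list
theorem pvInsB (start_cycle spread : Int) (hs : 0 < spread)
    (g : Nat → List (String × String)) :
    ∀ (N : Nat),
      (((List.range N).foldl
        (fun (d : PySem.Dict Int (List (String × String))) (k : Nat) =>
          d.insert (start_cycle + (k : Int) * spread) (g k)) PySem.Dict.empty)).items
      = (List.range N).map (fun (k : Nat) => (start_cycle + (k : Int) * spread, g k)) := by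
  intro N
  induction N with
  | zero => simp [PySem.Dict.empty]
  | succ N ih =>
    rw [List.range_succ, List.foldl_append, List.map_append]
    simp only [List.foldl_cons, List.foldl_nil, List.map_cons, List.map_nil]
    set d := (List.range N).foldl
        (fun (d : PySem.Dict Int (List (String × String))) (k : Nat) =>
          d.insert (start_cycle + (k : Int) * spread) (g k)) PySem.Dict.empty with hd
    have hnc : d.contains (start_cycle + (N : Int) * spread) = false := by
      apply pvNotContains
      intro k hk
      have : k ∈ d.items.map Prod.fst := by simpa [PySem.Dict.keys] using hk
      rw [ih] at this
      simp only [List.map_map, List.mem_map, List.mem_range] at this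
      obtain ⟨j, hj, rfl⟩ := this
      have : (j : Int) < (N : Int) := by exact_mod_cast hj
      simp only [Function.comp]
      nlinarith
    rw [PySem.Dict.items_insert_of_not_contains d _ hnc, ih]

-- ===== VERDICT (by name: the statement is the Claim_ definition above) =====
theorem build_schedule_burst_spec : Claim_equal_build_schedule_burst := by
  intro start_cycle flows count_per_flow spread _
  unfold Spec_build_schedule_burst build_schedule_burst build_schedule_burst_alt
  set m := flows.length with hm
  set n := count_per_flow.toNat with hn
  set F := (List.replicate n flows).flatten with hFdef
  set t : Int := (m : Int) * count_per_flow with ht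
  have hT : t.toNat = m * n := by
    rcases em (count_per_flow ≤ 0) with hc | hc
    · have h1 : t ≤ 0 := mul_nonpos_of_nonneg_of_nonpos (by positivity) hc
      have h2 : n = 0 := by omega
      simp [Int.toNat_of_nonpos h1, h2]
    · have h1 : ((n : Int)) = count_per_flow := Int.toNat_of_nonneg (by omega)
      rw [ht, ← h1, ← Nat.cast_mul, Int.toNat_natCast]
  have hFlen : F.length = m * n := by
    simp only [hFdef, List.length_flatten, List.map_replicate, List.sum_replicate, smul_eq_mul]
    exact Nat.mul_comm n flows.length
  have hTF : t.toNat = F.length := hT.trans hFlen.symm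
  have hR : PySem.List.pyRange 0 t 1 = (List.range (m * n)).map (fun (k : Nat) => (k : Int)) := by
    rw [PySem.List.pyRange_one, Int.sub_zero, hT]
    apply List.map_congr_left
    intro k _
    simp
  have hMap : (PySem.List.pyRange 0 t 1).map
      (fun i => PySem.List.pyGetD flows (PySem.Int.mod i (m : Int)) ("", "")) = F := by
    rw [hR, List.map_map, hFdef, ← pvMapMod flows n]
    apply List.map_congr_left
    intro k _
    simp [PySem.Int.mod_natCast, hm]
    rw [← Int.natCast_mod, PySem.List.pyGetD_natCast]
    simp [List.getD_eq_getElem?_getD]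
  by_cases hsp : spread ≤ 0
  · simp only [hsp, if_true]
    rw [pvFoldlRepeat flows _ (PySem.List.pyRange 0 count_per_flow 1) _, pvPyRangeLen]
    rw [pvFoldConst]
    split_ifs with h1 h2 h2
    · exfalso
      have hF : F = [] := h1
      rw [hF] at hTF
      simp at hTF
      omega
    · rfl
    · rw [PySem.Dict.getD_empty, hMap]
      have : ([] : List (String × String)) ++ F = F := by simp
      rw [this]
    · exfalso
      have hFne : F.length ≠ 0 := fun h0 => h1 (List.length_eq_zero_iff.mp h0)
      omega
  · have hs : 0 < spread := by omega
    simp only [hsp, if_false]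
    rw [pvFoldlRepeat (σ := PySem.Dict Int (List (String × String)) × Int) flows _
        (PySem.List.pyRange 0 count_per_flow 1) _, pvPyRangeLen]
    have hA := pvPlaceA start_cycle spread hs F 0 PySem.Dict.empty
      (by simp [PySem.Dict.keys_empty])
    rw [show start_cycle + 0 * spread = start_cycle by ring] at hA
    rw [hA]
    have hAitems : (PySem.Dict.mk ((PySem.Dict.empty : PySem.Dict Int (List (String × String))).items
          ++ (PySem.List.enumerate F 0).map
            (fun p => (start_cycle + p.1 * spread, [p.2])))).items
        = (List.range (m * n)).map
            (fun (k : Nat) => (start_cycle + (k : Int) * spread, [flows.getD (k % m) ("", "")])) := by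
      have he := PySem.List.enumerate_eq_map_pyRange F ("", "")
      have hlen : PySem.List.len F = ((m * n : Nat) : Int) := by
        simp [PySem.List.len, hFlen]
      rw [he, hlen, PySem.List.pyRange_one, List.map_map]
      simp only [Int.sub_zero, Int.toNat_natCast, List.map_map]
      simp only [PySem.Dict.empty, List.nil_append]
      apply List.map_congr_left
      intro k hk
      simp only [Function.comp, zero_add, PySem.List.pyGetD_natCast]
      rw [pvFlatGet flows n k (List.mem_range.mp hk)]
    rw [hAitems, hR, List.foldl_map]
    have hB := pvInsB start_cycle spread hs (fun k => [flows.getD (k % m) ("", "")]) (m * n)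
    simp only [PySem.Int.mod_natCast, PySem.List.pyGetD_natCast]
    exact hB.symm
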